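-- pv_equiv track=rewrite | github.com/pranavchavda/niftystrategist-v2 | backend/scripts/training/05_build_ticker_mapping.py | _expand_name
-- ===== SOURCE A (Python) =====
-- SUFFIX_EXPANSIONS = {
--     " LT": " Limited",
--     " LTD": " Limited",
--     " CORP": " Corporation",
--     " IND": " Industries",
--     " INDS": " Industries",
--     " INFRA": " Infrastructure",
--     " TECH": " Technologies",
--     " PHARMA": " Pharmaceuticals",
--     " FIN": " Finance",
--     " FINSERV": " Financial Services",
--     " FINSV": " Financial Services",
--     " ENT": " Enterprises",
--     " HLDNG": " Holdings",
--     " HFL": " Housing Finance Limited",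
-- }
--
-- def _expand_name(raw_name: str) -> str:
--     """Expand truncated instrument name suffixes."""
--     name = raw_name.strip()
--     upper = name.upper()
--     for suffix, expansion in SUFFIX_EXPANSIONS.items():
--         if upper.endswith(suffix):
--             # Replace the suffix portion only
--             name = name[: len(name) - len(suffix)] + expansion
--             break
--     return name
-- ===== SOURCE B (Python) =====
-- def _suffix_expansion(token):
--     """Expansion for a bare uppercase final token, or None."""
--     if token in ("LT", "LTD"):
--         return " Limited"
--     if token == "CORP":
--         return " Corporation"
--     if token in ("IND", "INDS"):
--         return " Industries"
--     if token == "INFRA":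
--         return " Infrastructure"
--     if token == "TECH":
--         return " Technologies"
--     if token == "PHARMA":
--         return " Pharmaceuticals"
--     if token in ("FINSERV", "FINSV"):
--         return " Financial Services"
--     if token == "FIN":
--         return " Finance"
--     if token == "ENT":
--         return " Enterprises"
--     if token == "HLDNG":
--         return " Holdings"
--     if token == "HFL":
--         return " Housing Finance Limited"
--     return None
--
--
-- def _expand_name(raw_name: str) -> str:
--     """Expand a truncated suffix: locate the last space, classify the final token."""
--     name = raw_name.strip()
--     i = name.rfind(' ')
--     if i < 0:
--         return name
--     exp = _suffix_expansion(name[i + 1:].upper())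
--     return name if exp is None else name[:i] + exp
-- ===== Notes on version B (the rewrite author's own statement) =====
-- stated objective: simpler
-- what changed: Instead of A's ordered endswith scan over 14 space-prefixed suffix keys, B locates the last literal space with rfind, uppercases the final token once, and classifies that bare token directly (returning prefix + expansion on a hit).
import Mathlib
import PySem

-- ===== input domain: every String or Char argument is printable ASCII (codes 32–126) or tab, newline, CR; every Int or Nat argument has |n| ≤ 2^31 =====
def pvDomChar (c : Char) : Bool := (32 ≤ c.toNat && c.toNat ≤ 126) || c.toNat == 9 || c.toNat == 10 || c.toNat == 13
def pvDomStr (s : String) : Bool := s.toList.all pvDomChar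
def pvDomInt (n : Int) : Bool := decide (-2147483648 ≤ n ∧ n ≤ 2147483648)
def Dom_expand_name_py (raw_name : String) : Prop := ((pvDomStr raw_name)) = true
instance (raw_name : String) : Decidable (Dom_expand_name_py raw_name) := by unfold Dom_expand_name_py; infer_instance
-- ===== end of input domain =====

-- B replaces A's ordered scan over 14 " SUFFIX" endswith checks by one rfind of the
-- last literal space and a direct classification of the bare final token (objective: simpler).

-- ===== PORT A =====
-- SUFFIX_EXPANSIONS, in insertion order
def pvSuffixExpansions : List (List Char × List Char) :=
  [(" LT".toList, " Limited".toList),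
   (" LTD".toList, " Limited".toList),
   (" CORP".toList, " Corporation".toList),
   (" IND".toList, " Industries".toList),
   (" INDS".toList, " Industries".toList),
   (" INFRA".toList, " Infrastructure".toList),
   (" TECH".toList, " Technologies".toList),
   (" PHARMA".toList, " Pharmaceuticals".toList),
   (" FIN".toList, " Finance".toList),
   (" FINSERV".toList, " Financial Services".toList),
   (" FINSV".toList, " Financial Services".toList),
   (" ENT".toList, " Enterprises".toList),
   (" HLDNG".toList, " Holdings".toList),
   (" HFL".toList, " Housing Finance Limited".toList)]

-- the for-loop with break: the first matching suffix wins
def pvExpandLoop (name upper : List Char) : List (List Char × List Char) → List Char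
  | [] => name
  | (suffix, expansion) :: rest =>
      if PySem.Chars.endswith upper suffix then
        -- name[: len(name) - len(suffix)] + expansion
        PySem.List.slice name none (some ((name.length : Int) - (suffix.length : Int))) ++ expansion
      else pvExpandLoop name upper rest

def expand_name_py (raw_name : String) : String :=
  let name := PySem.Chars.strip raw_name.toList
  String.ofList (pvExpandLoop name (PySem.Chars.upper name) pvSuffixExpansions)

-- ===== PORT B =====
-- _suffix_expansion: the if-chain classifying the bare uppercased final token
def pvSuffixExpansionFor (t : List Char) : Option (List Char) :=
  if t = ['L','T'] ∨ t = ['L','T','D'] then some " Limited".toList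
  else if t = ['C','O','R','P'] then some " Corporation".toList
  else if t = ['I','N','D'] ∨ t = ['I','N','D','S'] then some " Industries".toList
  else if t = ['I','N','F','R','A'] then some " Infrastructure".toList
  else if t = ['T','E','C','H'] then some " Technologies".toList
  else if t = ['P','H','A','R','M','A'] then some " Pharmaceuticals".toList
  else if t = ['F','I','N','S','E','R','V'] ∨ t = ['F','I','N','S','V'] then some " Financial Services".toList
  else if t = ['F','I','N'] then some " Finance".toList
  else if t = ['E','N','T'] then some " Enterprises".toList
  else if t = ['H','L','D','N','G'] then some " Holdings".toList
  else if t = ['H','F','L'] then some " Housing Finance Limited".toList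
  else none

-- name.rfind(' '): scan from the right; returns the index of the LAST space, none = Python's -1.
-- Exact hand port: findIdx? on the reverse finds the rightmost space; len-1-j is its index.
def expand_name_py_alt (raw_name : String) : String :=
  let name := PySem.Chars.strip raw_name.toList
  String.ofList <|
    match name.reverse.findIdx? (fun c => c == ' ') with
    | none => name                               -- i < 0
    | some j =>
        let i := name.length - 1 - j             -- the rfind index, 0 ≤ i < len(name)
        match pvSuffixExpansionFor (PySem.Chars.upper (name.drop (i+1))) with  -- name[i+1:], exact: 0 ≤ i+1
        | none => name
        | some e => name.take i ++ e             -- name[:i], exact: 0 ≤ i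

-- ===== PRECONDITION & SPEC =====
def Spec_expand_name_py (raw_name : String) (out : String) : Prop := out = expand_name_py_alt raw_name
instance (raw_name : String) (out : String) : Decidable (Spec_expand_name_py raw_name out) := by unfold Spec_expand_name_py; infer_instance

-- ===== CLAIM (what is proved, stated in full; the proofs are below) =====
def Claim_equal_expand_name_py : Prop := ∀ (raw_name : String), Dom_expand_name_py raw_name → Spec_expand_name_py raw_name (expand_name_py raw_name)

-- ===== LEMMAS AND PROOFS =====

-- A's suffix table, with the leading space split off each key (proof-side)
def pvBareTable : List (List Char × List Char) :=
  [(['L','T'], " Limited".toList),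
   (['L','T','D'], " Limited".toList),
   (['C','O','R','P'], " Corporation".toList),
   (['I','N','D'], " Industries".toList),
   (['I','N','D','S'], " Industries".toList),
   (['I','N','F','R','A'], " Infrastructure".toList),
   (['T','E','C','H'], " Technologies".toList),
   (['P','H','A','R','M','A'], " Pharmaceuticals".toList),
   (['F','I','N'], " Finance".toList),
   (['F','I','N','S','E','R','V'], " Financial Services".toList),
   (['F','I','N','S','V'], " Financial Services".toList),
   (['E','N','T'], " Enterprises".toList),
   (['H','L','D','N','G'], " Holdings".toList),
   (['H','F','L'], " Housing Finance Limited".toList)]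


set_option maxHeartbeats 2000000 in
theorem pv_tables : pvSuffixExpansions = pvBareTable.map (fun p => (' ' :: p.1, p.2)) := by rfl

-- the first-match scan over the table agrees with B's if-chain on every key
set_option maxHeartbeats 2000000 in
set_option maxRecDepth 8000 in
theorem pv_find_table (u : List Char) :
    (pvBareTable.find? (fun p => p.1 == u)).map Prod.snd = pvSuffixExpansionFor u := by
  by_cases h1 : u = (['L','T'] : List Char)
  · subst h1; rfl
  by_cases h2 : u = (['L','T','D'] : List Char)
  · subst h2; rfl
  by_cases h3 : u = (['C','O','R','P'] : List Char)
  · subst h3; rfl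
  by_cases h4 : u = (['I','N','D'] : List Char)
  · subst h4; rfl
  by_cases h5 : u = (['I','N','D','S'] : List Char)
  · subst h5; rfl
  by_cases h6 : u = (['I','N','F','R','A'] : List Char)
  · subst h6; rfl
  by_cases h7 : u = (['T','E','C','H'] : List Char)
  · subst h7; rfl
  by_cases h8 : u = (['P','H','A','R','M','A'] : List Char)
  · subst h8; rfl
  by_cases h9 : u = (['F','I','N'] : List Char)
  · subst h9; rfl
  by_cases h10 : u = (['F','I','N','S','E','R','V'] : List Char)
  · subst h10; rfl
  by_cases h11 : u = (['F','I','N','S','V'] : List Char)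
  · subst h11; rfl
  by_cases h12 : u = (['E','N','T'] : List Char)
  · subst h12; rfl
  by_cases h13 : u = (['H','L','D','N','G'] : List Char)
  · subst h13; rfl
  by_cases h14 : u = (['H','F','L'] : List Char)
  · subst h14; rfl
  have e1 : ((['L','T'] : List Char) == u) = false := by
    simp only [beq_eq_false_iff_ne]; exact fun he => h1 he.symm
  have e2 : ((['L','T','D'] : List Char) == u) = false := by
    simp only [beq_eq_false_iff_ne]; exact fun he => h2 he.symm
  have e3 : ((['C','O','R','P'] : List Char) == u) = false := by
    simp only [beq_eq_false_iff_ne]; exact fun he => h3 he.symm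
  have e4 : ((['I','N','D'] : List Char) == u) = false := by
    simp only [beq_eq_false_iff_ne]; exact fun he => h4 he.symm
  have e5 : ((['I','N','D','S'] : List Char) == u) = false := by
    simp only [beq_eq_false_iff_ne]; exact fun he => h5 he.symm
  have e6 : ((['I','N','F','R','A'] : List Char) == u) = false := by
    simp only [beq_eq_false_iff_ne]; exact fun he => h6 he.symm
  have e7 : ((['T','E','C','H'] : List Char) == u) = false := by
    simp only [beq_eq_false_iff_ne]; exact fun he => h7 he.symm
  have e8 : ((['P','H','A','R','M','A'] : List Char) == u) = false := by
    simp only [beq_eq_false_iff_ne]; exact fun he => h8 he.symm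
  have e9 : ((['F','I','N'] : List Char) == u) = false := by
    simp only [beq_eq_false_iff_ne]; exact fun he => h9 he.symm
  have e10 : ((['F','I','N','S','E','R','V'] : List Char) == u) = false := by
    simp only [beq_eq_false_iff_ne]; exact fun he => h10 he.symm
  have e11 : ((['F','I','N','S','V'] : List Char) == u) = false := by
    simp only [beq_eq_false_iff_ne]; exact fun he => h11 he.symm
  have e12 : ((['E','N','T'] : List Char) == u) = false := by
    simp only [beq_eq_false_iff_ne]; exact fun he => h12 he.symm
  have e13 : ((['H','L','D','N','G'] : List Char) == u) = false := by
    simp only [beq_eq_false_iff_ne]; exact fun he => h13 he.symm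
  have e14 : ((['H','F','L'] : List Char) == u) = false := by
    simp only [beq_eq_false_iff_ne]; exact fun he => h14 he.symm
  simp only [pvBareTable, List.find?_cons, e1, e2, e3, e4, e5, e6, e7, e8, e9, e10, e11, e12, e13, e14, List.find?_nil, Option.map_none,
    pvSuffixExpansionFor, h1, h2, h3, h4, h5, h6, h7, h8, h9, h10, h11, h12, h13, h14, or_self, if_neg, not_false_eq_true]

theorem pv_upperChar_space (c : Char) (h : PySem.Chars.upperChar c = ' ') : c = ' ' := by
  unfold PySem.Chars.upperChar at h
  split at h
  · rename_i hl
    have hb : 97 ≤ c.toNat ∧ c.toNat ≤ 122 := by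
      simpa [PySem.Chars.islower] using hl
    exfalso
    generalize hk : c.toNat - 32 = k at h
    have hk1 : 65 ≤ k := by omega
    have hk2 : k ≤ 90 := by omega
    interval_cases k <;> exact absurd h (by decide)
  · exact h

theorem pv_upper_append_sep (pre tok : List Char) :
    PySem.Chars.upper (pre ++ ' ' :: tok)
      = PySem.Chars.upper pre ++ ' ' :: PySem.Chars.upper tok := by
  have hsp : PySem.Chars.upperChar ' ' = ' ' := by decide
  simp [PySem.Chars.upper, hsp]

theorem pv_space_notmem_upper (l : List Char) (h : ' ' ∉ l) :
    ' ' ∉ PySem.Chars.upper l := by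
  intro hmem
  unfold PySem.Chars.upper at hmem
  obtain ⟨c, hc, hcu⟩ := List.mem_map.mp hmem
  exact h (pv_upperChar_space c hcu ▸ hc)

-- (a ++ [w]) is a prefix of (b ++ w :: c) iff a = b, when w occurs in neither a nor b
theorem pv_prefix_sep_iff (w : Char) (a : List Char) : ∀ (b c : List Char), w ∉ a → w ∉ b →
    ((a ++ [w]) <+: (b ++ w :: c) ↔ a = b) := by
  induction a with
  | nil =>
      intro b c _ hb
      cases b with
      | nil => simp
      | cons y b' =>
          simp only [List.nil_append, List.cons_append, List.cons_prefix_cons]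
          constructor
          · rintro ⟨rfl, -⟩; exact absurd List.mem_cons_self hb
          · intro hcon; simp at hcon
  | cons x a' ih =>
      intro b c ha hb
      have ha' : w ∉ a' := fun hm => ha (List.mem_cons_of_mem _ hm)
      cases b with
      | nil =>
          simp only [List.cons_append, List.nil_append, List.cons_prefix_cons]
          constructor
          · rintro ⟨rfl, -⟩; exact absurd List.mem_cons_self ha
          · intro hcon; simp at hcon
      | cons y b' =>
          have hb' : w ∉ b' := fun hm => hb (List.mem_cons_of_mem _ hm)
          simp only [List.cons_append, List.cons_prefix_cons]
          rw [ih b' c ha' hb']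
          simp

theorem pv_endswith_sep_iff (P K t : List Char) (hK : ' ' ∉ K) (ht : ' ' ∉ t) :
    (PySem.Chars.endswith (P ++ ' ' :: K) (' ' :: t) = true) ↔ t = K := by
  rw [PySem.Chars.endswith_iff]
  rw [← List.reverse_prefix]
  have h1 : (' ' :: t).reverse = t.reverse ++ [' '] := by simp
  have h2 : (P ++ ' ' :: K).reverse = K.reverse ++ ' ' :: P.reverse := by simp
  rw [h1, h2, pv_prefix_sep_iff ' ' t.reverse K.reverse P.reverse
        (by simpa using ht) (by simpa using hK)]
  constructor
  · intro h; simpa using congrArg List.reverse h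
  · intro h; cases h; rfl

theorem pv_loop_nospace (name u : List Char) (hu : ' ' ∉ u)
    (T : List (List Char × List Char)) :
    pvExpandLoop name u (T.map (fun p => (' ' :: p.1, p.2))) = name := by
  induction T with
  | nil => rfl
  | cons p rest ih =>
      obtain ⟨t, e⟩ := p
      simp only [List.map_cons, pvExpandLoop]
      have hend : PySem.Chars.endswith u (' ' :: t) = false := by
        rw [Bool.eq_false_iff]
        intro hc
        have hsuf : (' ' :: t) <:+ u := (PySem.Chars.endswith_iff u (' ' :: t)).mp hc
        exact hu (hsuf.subset List.mem_cons_self)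
      rw [hend]
      simpa using ih

theorem pv_loop_found (pre tok : List Char) (htok : ' ' ∉ tok) :
    ∀ (T : List (List Char × List Char)), (∀ p ∈ T, ' ' ∉ p.1) →
    pvExpandLoop (pre ++ ' ' :: tok) (PySem.Chars.upper (pre ++ ' ' :: tok))
        (T.map (fun p => (' ' :: p.1, p.2)))
      = match T.find? (fun p => p.1 == PySem.Chars.upper tok) with
        | some p => pre ++ p.2
        | none => pre ++ ' ' :: tok := by
  intro T
  induction T with
  | nil => intro _; rfl
  | cons p rest ih =>
      intro hT
      obtain ⟨t, e⟩ := p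
      have ht : ' ' ∉ t := hT (t, e) List.mem_cons_self
      have hutok : ' ' ∉ PySem.Chars.upper tok := pv_space_notmem_upper tok htok
      simp only [List.map_cons, pvExpandLoop]
      rw [pv_upper_append_sep]
      by_cases heq : t = PySem.Chars.upper tok
      · rw [if_pos (by rw [pv_endswith_sep_iff _ _ _ hutok ht]; exact heq)]
        rw [List.find?_cons_of_pos (by simp [heq])]
        have hlt : t.length = tok.length := by rw [heq]; simp [PySem.Chars.upper]
        have hlen : (((pre ++ ' ' :: tok).length : Nat) : Int) - (((' ' :: t).length : Nat) : Int)
            = ((pre.length : Nat) : Int) := by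
          simp [hlt]
        rw [hlen, PySem.List.slice_to_natCast, List.take_left]
      · rw [if_neg (by rw [pv_endswith_sep_iff _ _ _ hutok ht]; exact heq)]
        rw [List.find?_cons_of_neg (by simp [heq]), ← pv_upper_append_sep]
        exact ih (fun q hq => hT q (List.mem_cons_of_mem _ hq))

-- if findIdx? finds no space in the reverse, the list has no space at all
theorem pv_rfind_none (name : List Char)
    (h : name.reverse.findIdx? (fun c => c == ' ') = none) : ' ' ∉ name := by
  intro hmem
  have := List.findIdx?_eq_none_iff.mp h ' ' (List.mem_reverse.mpr hmem)
  simp at this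

-- if findIdx? finds the rightmost space at reverse-index j, then with i = len-1-j the
-- list splits as take i ++ ' ' :: drop (i+1), and the tail drop (i+1) is space-free
theorem pv_rfind_some (name : List Char) (j : Nat)
    (h : name.reverse.findIdx? (fun c => c == ' ') = some j) :
    name = name.take (name.length - 1 - j) ++ ' ' :: name.drop (name.length - 1 - j + 1)
      ∧ ' ' ∉ name.drop (name.length - 1 - j + 1) := by
  obtain ⟨hj, hp, hmin⟩ := List.findIdx?_eq_some_iff_getElem.mp h
  rw [List.length_reverse] at hj
  have hi : name.length - 1 - j < name.length := by omega
  have hgi : name[name.length - 1 - j]'hi = ' ' := by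
    have := List.getElem_reverse (l := name) (i := j) (by rw [List.length_reverse]; exact hj)
    rw [this] at hp
    simpa using hp
  constructor
  · conv_lhs => rw [← List.take_append_drop (name.length - 1 - j) name]
    rw [List.drop_eq_getElem_cons hi, hgi]
  · intro hmem
    obtain ⟨k, hk, hke⟩ := List.getElem_of_mem hmem
    rw [List.getElem_drop] at hke
    rw [List.length_drop] at hk
    have hlt : name.length - 1 - (name.length - 1 - j + 1 + k) < j := by omega
    have := hmin _ hlt
    have hrev := List.getElem_reverse (l := name)
      (i := name.length - 1 - (name.length - 1 - j + 1 + k))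
      (by rw [List.length_reverse]; omega)
    rw [hrev] at this
    have hidx : name.length - 1 - (name.length - 1 - (name.length - 1 - j + 1 + k))
        = name.length - 1 - j + 1 + k := by omega
    simp only [hidx] at this
    rw [hke] at this
    simp at this

-- ===== VERDICT (by name: the statement is the Claim_ definition above) =====
theorem expand_name_py_spec : Claim_equal_expand_name_py := by
  intro raw _
  unfold Spec_expand_name_py expand_name_py expand_name_py_alt
  set name := PySem.Chars.strip raw.toList with hname
  cases hfi : name.reverse.findIdx? (fun c => c == ' ') with
  | none =>
      have hns := pv_rfind_none name hfi
      simp only [hfi]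
      rw [pv_tables, pv_loop_nospace _ _ (pv_space_notmem_upper _ hns) pvBareTable]
  | some j =>
      obtain ⟨hdecomp, htok⟩ := pv_rfind_some name j hfi
      simp only [hfi]
      have hkeys : ∀ p ∈ pvBareTable, ' ' ∉ p.1 := by decide
      have hloop := pv_loop_found (name.take (name.length - 1 - j))
          (name.drop (name.length - 1 - j + 1)) htok pvBareTable hkeys
      conv_lhs => rw [hdecomp]
      rw [pv_tables, hloop]
      have hfind := pv_find_table (PySem.Chars.upper (name.drop (name.length - 1 - j + 1)))
      cases hf : pvBareTable.find?
          (fun p => p.1 == PySem.Chars.upper (name.drop (name.length - 1 - j + 1))) with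
      | none =>
          have hB : pvSuffixExpansionFor
              (PySem.Chars.upper (name.drop (name.length - 1 - j + 1))) = none := by
            rw [← hfind, hf]; rfl
          rw [hB]
          exact congrArg String.ofList hdecomp.symm
      | some p =>
          have hB : pvSuffixExpansionFor
              (PySem.Chars.upper (name.drop (name.length - 1 - j + 1))) = some p.2 := by
            rw [← hfind, hf]; rfl
          rw [hB]
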